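-- pv_equiv track=rewrite | github.com/ms-osram/advent-of-code-py | 2016/aoc201607.py | aba_bab
-- ===== SOURCE A (Python) =====
-- def aba_bab(string):
--     patterns = []
--     for c1, c2, c3 in zip(string, string[1:], string[2:]):
--
--         if c1 == c3 and c1 != c2:
--             patterns.append(c2+c1+c2)
--
--     if patterns:
--         return patterns
--     else:
--         return None
-- ===== SOURCE B (Python) =====
-- def aba_bab(string):
--     pos = {}
--     for i, c in enumerate(string):
--         pos.setdefault(c, []).append(i)
--     hits = []
--     for c, ps in pos.items():
--         sps = set(ps)
--         for i in ps:
--             if i + 2 in sps and string[i + 1] != c: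
--                 hits.append(i)
--     hits.sort()
--     if hits:
--         return [string[i + 1] + string[i] + string[i + 1] for i in hits]
--     return None
-- ===== Notes on version B (the rewrite author's own statement) =====
-- stated objective: alternative
-- what changed: Instead of A's single pass over all length-3 windows, B first builds a dict mapping each character to its list of positions, then for each character class finds positions p with p+2 also in the class (via a per-class set) and a different middle character, sorts the collected hit indices, and maps them to BAB strings.
import Mathlib
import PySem

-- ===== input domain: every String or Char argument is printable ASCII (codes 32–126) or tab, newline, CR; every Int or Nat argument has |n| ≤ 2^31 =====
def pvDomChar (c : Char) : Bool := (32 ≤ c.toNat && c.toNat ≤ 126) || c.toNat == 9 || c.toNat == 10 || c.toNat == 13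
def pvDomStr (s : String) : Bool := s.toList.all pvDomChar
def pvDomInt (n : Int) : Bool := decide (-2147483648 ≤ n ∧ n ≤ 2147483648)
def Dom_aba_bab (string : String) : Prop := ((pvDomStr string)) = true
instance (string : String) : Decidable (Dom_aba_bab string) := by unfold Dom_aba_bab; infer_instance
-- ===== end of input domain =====

-- B replaces A's single pass over length-3 windows by a different algorithm: it first indexes
-- every character's positions in a dict, then per character class finds positions p with p+2
-- in the same class and a different middle character, sorts the hit indices, and maps them to
-- BAB strings (objective: alternative, same order of cost).

-- ===== PORT A =====
-- zip(string, string[1:], string[2:]); loop appends c2+c1+c2 when c1 == c3 and c1 != c2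
def aba_bab (string : String) : Option (List String) :=
  let l := string.toList
  let triples := (l.zip (l.drop 1)).zip (l.drop 2)
  let patterns := triples.foldl
    (fun acc x =>
      if x.1.1 = x.2 ∧ x.1.1 ≠ x.1.2 then acc ++ [String.ofList [x.1.2, x.1.1, x.1.2]] else acc) []
  if patterns ≠ [] then some patterns else none

-- ===== PORT B =====
-- pos = {}; for i, c in enumerate(string): pos.setdefault(c, []).append(i)
-- (Dict.modify with default [] is exactly setdefault(c, []).append(i))
-- then for c, ps in pos.items(): sps = set(ps); for i in ps: if i+2 in sps and string[i+1] != c: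
-- hits.append(i). hits.sort(); build the BAB strings from the sorted hit indices (the
-- `i+2 in sps` guard keeps i+1 in range, so Python's string[i+1] never raises; `and`/`!=`/`in`
-- are ported as Bool ops, set(ps) as PySem.Set.ofList).
def aba_bab_alt (string : String) : Option (List String) :=
  let l := string.toList
  let pos := (PySem.List.enumerate l).foldl
    (fun d p => d.modify p.2 [] (· ++ [p.1])) PySem.Dict.empty
  let hits := pos.items.foldl
    (fun acc cp =>
      let sps := PySem.Set.ofList cp.2
      cp.2.foldl
        (fun acc i =>
          if PySem.Set.contains sps (i + 2) && (PySem.List.pyGet? l (i + 1) != some cp.1)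
          then acc ++ [i] else acc) acc) []
  let shits := PySem.List.sorted hits (fun x => x) false
  if shits ≠ [] then
    some (shits.map (fun i =>
      String.ofList [(PySem.List.pyGet? l (i + 1)).getD ' ', (PySem.List.pyGet? l i).getD ' ',
                     (PySem.List.pyGet? l (i + 1)).getD ' ']))
  else none

-- ===== PRECONDITION & SPEC =====
def Spec_aba_bab (string : String) (out : Option (List String)) : Prop := out = aba_bab_alt string
instance (string : String) (out : Option (List String)) : Decidable (Spec_aba_bab string out) := by unfold Spec_aba_bab; infer_instance

-- ===== CLAIM (what is proved, stated in full; the proofs are below) =====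
def Claim_equal_aba_bab : Prop := ∀ (string : String), Dom_aba_bab string → Spec_aba_bab string (aba_bab string)

-- ===== LEMMAS AND PROOFS =====

-- the position list of character c, as B's dict stores it
def pvPosOf (l : List Char) (c : Char) : List Int :=
  (((PySem.List.enumerate l).map Prod.swap).filter (fun q => q.1 == c)).map (·.2)

-- the ascending list of window starts k with l[k] = l[k+2] ≠ l[k+1]
def pvGood (l : List Char) : List Nat :=
  (List.range (l.length - 2)).filter
    (fun k => decide (l.getD k ' ' = l.getD (k+2) ' ' ∧ l.getD k ' ' ≠ l.getD (k+1) ' '))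

-- A's Prop-valued if, as the Bool-filter fold shape
theorem pv_foldl_append_ite {α β : Type} (P : α → Prop) [DecidablePred P] (f : α → β)
    (l : List α) (acc : List β) :
    l.foldl (fun acc x => if P x then acc ++ [f x] else acc) acc
    = acc ++ (l.filter (fun x => decide (P x))).map f := by
  induction l generalizing acc with
  | nil => simp
  | cons h t ih => by_cases hp : P h <;> simp [hp, ih]

theorem pv_triples_eq (l : List Char) :
    (l.zip (l.drop 1)).zip (l.drop 2)
    = (List.range (l.length - 2)).map
        (fun k => ((l.getD k ' ', l.getD (k+1) ' '), l.getD (k+2) ' ')) := by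
  apply List.ext_getElem
  · simp; omega
  · intro i h1 h2
    simp only [List.getElem_zip, List.getElem_drop, List.getElem_map, List.getElem_range]
    have hi : i < l.length - 2 := by simpa using h2
    rw [List.getD_eq_getElem l ' ' (by omega), List.getD_eq_getElem l ' ' (by omega),
        List.getD_eq_getElem l ' ' (by omega)]
    simp [show 1 + i = i + 1 by omega, show 2 + i = i + 2 by omega]

theorem pv_a_patterns (l : List Char) :
    ((l.zip (l.drop 1)).zip (l.drop 2)).foldl
      (fun acc x =>
        if x.1.1 = x.2 ∧ x.1.1 ≠ x.1.2 then acc ++ [String.ofList [x.1.2, x.1.1, x.1.2]] else acc) []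
    = (pvGood l).map (fun k => String.ofList [l.getD (k+1) ' ', l.getD k ' ', l.getD (k+1) ' ']) := by
  rw [pv_triples_eq,
      pv_foldl_append_ite (fun x : (Char × Char) × Char => x.1.1 = x.2 ∧ x.1.1 ≠ x.1.2)
        (fun x => String.ofList [x.1.2, x.1.1, x.1.2])]
  rw [List.filter_map, List.map_map]
  simp [pvGood, Function.comp_def]

theorem pv_getD_pos (l : List Char) (c : Char) :
    ((PySem.List.enumerate l).foldl
      (fun d p => d.modify p.2 [] (· ++ [p.1])) PySem.Dict.empty).getD c [] = pvPosOf l c := by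
  have h : (PySem.List.enumerate l).foldl
      (fun d p => d.modify p.2 [] (· ++ [p.1])) PySem.Dict.empty
      = ((PySem.List.enumerate l).map Prod.swap).foldl
        (fun d q => d.modify q.1 [] (· ++ [q.2])) PySem.Dict.empty := by
    rw [List.foldl_map]; rfl
  rw [h, PySem.Dict.getD_foldl_modify_append]

  simp [pvPosOf]

theorem pv_mem_posOf (l : List Char) (c : Char) (x : Int) :
    x ∈ pvPosOf l c ↔ ∃ k : Nat, k < l.length ∧ x = (k : Int) ∧ l.getD k ' ' = c := by
  simp only [pvPosOf, List.mem_map, List.mem_filter, PySem.List.mem_enumerate_iff]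
  constructor
  · rintro ⟨q, ⟨⟨p, ⟨k, hk, rfl⟩, rfl⟩, hc⟩, rfl⟩
    refine ⟨k, hk, by simp, ?_⟩
    rw [List.getD_eq_getElem l ' ' hk]
    simpa using hc
  · rintro ⟨k, hk, rfl, hc⟩
    refine ⟨((0 : Int) + k, l[k]).swap, ⟨⟨((0 : Int) + k, l[k]), ⟨k, hk, rfl⟩, rfl⟩, ?_⟩, by simp⟩
    rw [List.getD_eq_getElem l ' ' hk] at hc
    simpa using hc

theorem pv_nodup_posOf (l : List Char) (c : Char) : (pvPosOf l c).Nodup := by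
  have h1 := PySem.List.pairwise_lt_enumerate l 0
  have h2 : (((PySem.List.enumerate l).map Prod.swap).filter (fun q => q.1 == c)).Pairwise
      (fun p q => p.2 < q.2) := by
    apply List.Pairwise.filter
    rw [List.pairwise_map]
    exact h1
  have h3 : (pvPosOf l c).Pairwise (· < ·) := by
    unfold pvPosOf
    rw [List.pairwise_map]
    exact h2
  exact h3.imp ne_of_lt

theorem pv_hits_eq (l : List Char) :
    ((PySem.List.enumerate l).foldl
        (fun d p => d.modify p.2 [] (· ++ [p.1])) PySem.Dict.empty).items.foldl
      (fun acc cp =>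
        let sps := PySem.Set.ofList cp.2
        cp.2.foldl
          (fun acc i =>
            if PySem.Set.contains sps (i + 2) && (PySem.List.pyGet? l (i + 1) != some cp.1)
            then acc ++ [i] else acc) acc) []
    = (PySem.Set.ofList l).flatMap (fun c =>
        (pvPosOf l c).filter
          (fun i => PySem.Set.contains (PySem.Set.ofList (pvPosOf l c)) (i + 2) && (PySem.List.pyGet? l (i + 1) != some c))) := by
  set d := (PySem.List.enumerate l).foldl
    (fun d p => d.modify p.2 [] (· ++ [p.1])) PySem.Dict.empty with hd
  have hkeys : d.keys = PySem.Set.ofList l := by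
    rw [hd]
    rw [PySem.Dict.keys_foldl_modify_key (PySem.List.enumerate l) Prod.snd
          [] (fun d p => (· ++ [p.1])) PySem.Dict.empty]
    rw [PySem.List.map_snd_enumerate]
    rfl
  have hnd : d.keys.Nodup := by rw [hkeys]; exact PySem.Set.nodup_ofList l
  have hitems : d.items = d.keys.map (fun c => (c, d.getD c [])) :=
    PySem.Dict.items_eq_map_keys d hnd []
  rw [hitems]
  have hstep : ∀ cp ∈ d.keys.map (fun c => (c, d.getD c [])), ∀ acc : List Int,
      (let sps := PySem.Set.ofList cp.2
       cp.2.foldl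
        (fun acc i =>
          if PySem.Set.contains sps (i + 2) && (PySem.List.pyGet? l (i + 1) != some cp.1)
          then acc ++ [i] else acc) acc)
      = acc ++ cp.2.filter
          (fun i => PySem.Set.contains (PySem.Set.ofList cp.2) (i + 2) && (PySem.List.pyGet? l (i + 1) != some cp.1)) := by
    intro cp _ acc
    show cp.2.foldl
        (fun acc i =>
          if PySem.Set.contains (PySem.Set.ofList cp.2) (i + 2) && (PySem.List.pyGet? l (i + 1) != some cp.1)
          then acc ++ [i] else acc) acc = _
    rw [PySem.List.foldl_append_if
        (fun i => PySem.Set.contains (PySem.Set.ofList cp.2) (i + 2) && (PySem.List.pyGet? l (i + 1) != some cp.1))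
        (fun i => i)]
    rw [List.map_id']
  rw [PySem.List.foldl_congr_mem' _ _ _ _ hstep]
  rw [PySem.List.foldl_append_eq_flatMap]
  rw [List.flatMap_map]
  have hgetD : ∀ c, d.getD c [] = pvPosOf l c := fun c => by rw [hd]; exact pv_getD_pos l c
  rw [hkeys]
  simp only [hgetD, List.nil_append]

theorem pv_mem_hits (l : List Char) (x : Int) :
    (x ∈ (PySem.Set.ofList l).flatMap (fun c =>
        (pvPosOf l c).filter
          (fun i => PySem.Set.contains (PySem.Set.ofList (pvPosOf l c)) (i + 2) && (PySem.List.pyGet? l (i + 1) != some c))))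
    ↔ ∃ k : Nat, k + 2 < l.length ∧ x = (k : Int) ∧
        l.getD k ' ' = l.getD (k+2) ' ' ∧ l.getD k ' ' ≠ l.getD (k+1) ' ' := by
  constructor
  · intro hx
    rw [List.mem_flatMap] at hx
    obtain ⟨c, hcmem, hxf⟩ := hx
    rw [List.mem_filter] at hxf
    obtain ⟨hxp, hcond⟩ := hxf
    rw [pv_mem_posOf] at hxp
    obtain ⟨k, hk, rfl, hkc⟩ := hxp
    rw [Bool.and_eq_true] at hcond
    obtain ⟨hcont, hne⟩ := hcond
    have hmem2 : ((k : Int) + 2) ∈ pvPosOf l c := by simpa [pysem] using hcont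
    rw [pv_mem_posOf] at hmem2
    obtain ⟨k2, hk2, heq, hk2c⟩ := hmem2
    have hk2e : k2 = k + 2 := by omega
    subst hk2e
    refine ⟨k, by omega, rfl, by rw [hkc, hk2c], ?_⟩
    have h1 : PySem.List.pyGet? l ((k : Int) + 1) = l[(k+1)]? := by
      rw [show ((k : Int) + 1) = ((k + 1 : Nat) : Int) by push_cast; ring]
      exact PySem.List.pyGet?_natCast l (k + 1)
    rw [bne_iff_ne, h1] at hne
    have hk1 : k + 1 < l.length := by omega
    rw [List.getElem?_eq_getElem hk1] at hne
    intro hcontra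
    apply hne
    exact congrArg some (by rw [← List.getD_eq_getElem l ' ' hk1, ← hcontra, hkc])
  · rintro ⟨k, hk, rfl, he, hne⟩
    refine List.mem_flatMap.2 ⟨l.getD k ' ', ?_, ?_⟩
    · rw [PySem.Set.mem_ofList, List.getD_eq_getElem l ' ' (by omega)]
      exact List.getElem_mem _
    · rw [List.mem_filter]
      refine ⟨(pv_mem_posOf _ _ _).2 ⟨k, by omega, rfl, rfl⟩, ?_⟩
      rw [Bool.and_eq_true]
      refine ⟨?_, ?_⟩
      · have hm : ((k : Int) + 2) ∈ pvPosOf l (l.getD k ' ') :=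
          (pv_mem_posOf _ _ _).2 ⟨k + 2, by omega, by push_cast; ring, he.symm⟩
        simpa [pysem] using hm
      · rw [bne_iff_ne]
        have h1 : PySem.List.pyGet? l ((k : Int) + 1) = l[(k+1)]? := by
          rw [show ((k : Int) + 1) = ((k + 1 : Nat) : Int) by push_cast; ring]
          exact PySem.List.pyGet?_natCast l (k + 1)
        rw [h1, List.getElem?_eq_getElem (show k + 1 < l.length by omega)]
        intro hcontra
        apply hne
        rw [List.getD_eq_getElem l ' ' (show k + 1 < l.length by omega)]
        exact (Option.some.inj hcontra).symm

theorem pv_nodup_hits (l : List Char) :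
    ((PySem.Set.ofList l).flatMap (fun c =>
        (pvPosOf l c).filter
          (fun i => PySem.Set.contains (PySem.Set.ofList (pvPosOf l c)) (i + 2) && (PySem.List.pyGet? l (i + 1) != some c)))).Nodup := by
  rw [List.nodup_flatMap]
  refine ⟨fun c _ => (pv_nodup_posOf l c).filter _, ?_⟩
  refine List.Pairwise.imp ?_ (PySem.Set.nodup_ofList l)
  intro a b hab x hx1 hx2
  rw [List.mem_filter] at hx1 hx2
  obtain ⟨k, _, rfl, hka⟩ := (pv_mem_posOf l a x).1 hx1.1
  obtain ⟨k2, _, hxe, hkb⟩ := (pv_mem_posOf l b _).1 hx2.1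
  have : k2 = k := by omega
  subst this
  exact hab (hka ▸ hkb ▸ rfl)

theorem pv_pyGet1 (l : List Char) (k : Nat) :
    PySem.List.pyGet? l (Int.ofNat k + 1) = l[k+1]? := by
  rw [Int.ofNat_eq_natCast, show ((k : Int) + 1) = ((k + 1 : Nat) : Int) by push_cast; ring]
  exact PySem.List.pyGet?_natCast l (k + 1)

theorem pv_pyGet0 (l : List Char) (k : Nat) :
    PySem.List.pyGet? l (Int.ofNat k) = l[k]? := by
  rw [Int.ofNat_eq_natCast]
  exact PySem.List.pyGet?_natCast l k

theorem pv_sorted_hits (l : List Char) :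
    PySem.List.sorted
      ((PySem.Set.ofList l).flatMap (fun c =>
        (pvPosOf l c).filter
          (fun i => PySem.Set.contains (PySem.Set.ofList (pvPosOf l c)) (i + 2) && (PySem.List.pyGet? l (i + 1) != some c))))
      (fun x => x) false
    = (pvGood l).map Int.ofNat := by
  have hys_nodup : ((pvGood l).map Int.ofNat).Nodup := by
    refine List.Nodup.map (fun a b h => Int.ofNat.inj h) ?_
    unfold pvGood
    exact List.Nodup.filter _ List.nodup_range
  have hys_pair : ((pvGood l).map Int.ofNat).Pairwise (fun a b => a < b) := by
    rw [List.pairwise_map]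
    have hp : (pvGood l).Pairwise (· < ·) := by
      unfold pvGood
      exact List.Pairwise.filter _ List.pairwise_lt_range
    exact hp.imp (fun {a b} h => Int.ofNat_lt.2 h)
  refine PySem.List.sorted_eq_of_perm_of_pairwise_lt _ _ _ ?_ hys_pair
  refine List.perm_of_nodup_nodup_toFinset_eq hys_nodup (pv_nodup_hits l) ?_
  ext x
  simp only [List.mem_toFinset]
  rw [pv_mem_hits]
  simp only [List.mem_map, pvGood, List.mem_filter, List.mem_range, decide_eq_true_eq,
    Int.ofNat_eq_natCast]
  constructor
  · rintro ⟨k, ⟨hk, he, hne⟩, rfl⟩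
    exact ⟨k, by omega, rfl, he, hne⟩
  · rintro ⟨k, hk, rfl, he, hne⟩
    exact ⟨k, ⟨by omega, he, hne⟩, rfl⟩

-- ===== VERDICT (by name: the statement is the Claim_ definition above) =====
theorem aba_bab_spec : Claim_equal_aba_bab := by
  intro s _
  unfold Spec_aba_bab aba_bab aba_bab_alt
  simp only [pv_a_patterns, pv_hits_eq, pv_sorted_hits]
  have hmap : ((pvGood s.toList).map Int.ofNat).map
      (fun i => String.ofList [(PySem.List.pyGet? s.toList (i + 1)).getD ' ',
        (PySem.List.pyGet? s.toList i).getD ' ', (PySem.List.pyGet? s.toList (i + 1)).getD ' '])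
      = (pvGood s.toList).map
        (fun k => String.ofList [s.toList.getD (k+1) ' ', s.toList.getD k ' ',
                                 s.toList.getD (k+1) ' ']) := by
    rw [List.map_map]
    apply List.map_congr_left
    intro k hk
    have hk2 : k < s.toList.length - 2 := by
      have h := hk
      simp only [pvGood, List.mem_filter, List.mem_range] at h
      exact h.1
    simp only [Function.comp_apply, pv_pyGet0, pv_pyGet1]
    rw [List.getElem?_eq_getElem (show k + 1 < s.toList.length by omega),
        List.getElem?_eq_getElem (show k < s.toList.length by omega)]
    simp only [Option.getD_some]
    rw [List.getD_eq_getElem s.toList ' ' (show k + 1 < s.toList.length by omega),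
        List.getD_eq_getElem s.toList ' ' (show k < s.toList.length by omega)]
  rw [hmap]
  by_cases hgood : pvGood s.toList = []
  · simp [hgood]
  · simp [hgood, List.map_eq_nil_iff]
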